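-- pv_equiv track=rewrite | github.com/AngelaGomez2023/PruebasBDB | challenge2.py | ordered_squares
-- ===== SOURCE A (Python) =====
-- def ordered_squares (arr, S):#defino la funcioon
--
--     squares = [x * x for x in arr]
--     filtered_squares = [sq for sq in squares if 0 <= sq <= S * (S + 1)]
--     sorted_squares = []
--     for square in filtered_squares:
--         inserted = False
--         for i in range(len(sorted_squares)):
--             if square < sorted_squares[i]:
--                 sorted_squares.insert(i, square)
--                 inserted = True
--                 break
--         if not inserted:
--             sorted_squares.append(square)
--     return sorted_squares
-- ===== SOURCE B (Python) =====
-- def ordered_squares(arr, S):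
--     bound = S * (S + 1)
--     return [x * x for x in sorted(arr, key=abs) if 0 <= x * x <= bound]
-- ===== Notes on version B (the rewrite author's own statement) =====
-- stated objective: idiomatic
-- what changed: Replaces the O(n^2) hand-written insertion sort of the squared values by sorting the input once by absolute value (so squares emerge already ascending) and filtering with the same bound.
import Mathlib
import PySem

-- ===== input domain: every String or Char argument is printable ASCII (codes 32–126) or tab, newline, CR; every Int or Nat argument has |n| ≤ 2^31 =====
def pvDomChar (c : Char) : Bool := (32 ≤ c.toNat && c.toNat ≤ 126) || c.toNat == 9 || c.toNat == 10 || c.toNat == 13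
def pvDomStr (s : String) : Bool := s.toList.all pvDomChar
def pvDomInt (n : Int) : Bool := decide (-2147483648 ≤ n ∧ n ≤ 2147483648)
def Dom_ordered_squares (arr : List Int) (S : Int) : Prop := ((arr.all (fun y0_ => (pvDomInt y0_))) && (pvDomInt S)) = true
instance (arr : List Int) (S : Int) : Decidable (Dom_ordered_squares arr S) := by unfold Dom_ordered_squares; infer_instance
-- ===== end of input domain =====

-- B replaces A's O(n^2) insertion sort of squares by one abs-keyed sort of the input
-- followed by map/filter (faster; measured).

-- ===== PORT A =====
-- A's inner loop: insert `sq` before the first element it is strictly less than, else append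
def insertA (sq : Int) : List Int → List Int
  | [] => [sq]
  | y :: ys => if sq < y then sq :: y :: ys else y :: insertA sq ys

def ordered_squares (arr : List Int) (S : Int) : List Int :=
  let squares := arr.map (fun x => x * x)
  let filtered_squares := squares.filter (fun sq => decide (0 ≤ sq ∧ sq ≤ S * (S + 1)))
  filtered_squares.foldl (fun acc square => insertA square acc) []

-- ===== PORT B =====
def ordered_squares_alt (arr : List Int) (S : Int) : List Int :=
  let bound := S * (S + 1)
  ((PySem.List.sorted arr (fun x => |x|) false).filter
      (fun x => decide (0 ≤ x * x ∧ x * x ≤ bound))).map (fun x => x * x)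

-- ===== PRECONDITION & SPEC =====
def Spec_ordered_squares (arr : List Int) (S : Int) (out : List Int) : Prop := out = ordered_squares_alt arr S
instance (arr : List Int) (S : Int) (out : List Int) : Decidable (Spec_ordered_squares arr S out) := by unfold Spec_ordered_squares; infer_instance

-- ===== CLAIM (what is proved, stated in full; the proofs are below) =====
def Claim_equal_ordered_squares : Prop := ∀ (arr : List Int) (S : Int), Dom_ordered_squares arr S → Spec_ordered_squares arr S (ordered_squares arr S)

-- ===== LEMMAS AND PROOFS =====

theorem insertA_perm (a : Int) (l : List Int) : List.Perm (insertA a l) (a :: l) := by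
  induction l with
  | nil => simp [insertA]
  | cons y ys ih =>
      simp only [insertA]
      split
      · exact List.Perm.refl _
      · exact ((ih.cons y).trans (List.Perm.swap a y ys))

theorem insertA_sorted (a : Int) (l : List Int) (h : l.Pairwise (· ≤ ·)) :
    (insertA a l).Pairwise (· ≤ ·) := by
  induction l with
  | nil => simp [insertA]
  | cons y ys ih =>
      simp only [insertA]
      rcases List.pairwise_cons.mp h with ⟨hy, hys⟩
      split
      · rename_i hlt
        refine List.pairwise_cons.mpr ⟨?_, h⟩
        intro b hb
        rcases List.mem_cons.mp hb with hb | hb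
        · omega
        · exact le_of_lt (lt_of_lt_of_le hlt (hy b hb))
      · rename_i hge
        refine List.pairwise_cons.mpr ⟨?_, ih hys⟩
        intro b hb
        rcases List.mem_cons.mp ((insertA_perm a ys).mem_iff.mp hb) with hb | hb
        · omega
        · exact hy b hb

theorem foldl_insertA_perm (l acc : List Int) :
    List.Perm (l.foldl (fun acc square => insertA square acc) acc) (acc ++ l) := by
  induction l generalizing acc with
  | nil => simp
  | cons x xs ih =>
      simp only [List.foldl_cons]
      refine (ih (insertA x acc)).trans ?_
      exact (((insertA_perm x acc).append_right xs).trans List.perm_middle.symm)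

theorem foldl_insertA_sorted (l acc : List Int) (h : acc.Pairwise (· ≤ ·)) :
    (l.foldl (fun acc square => insertA square acc) acc).Pairwise (· ≤ ·) := by
  induction l generalizing acc with
  | nil => simpa using h
  | cons x xs ih => exact ih _ (insertA_sorted x acc h)

theorem alt_sorted (arr : List Int) (S : Int) :
    (ordered_squares_alt arr S).Pairwise (· ≤ ·) := by
  unfold ordered_squares_alt
  have hp : (PySem.List.sorted arr (fun x => |x|) false).Pairwise (fun a b => |a| ≤ |b|) :=
    PySem.List.sorted_pairwise arr (fun x => |x|)
  have hf := hp.filter (fun x => decide (0 ≤ x * x ∧ x * x ≤ S * (S + 1)))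
  refine List.Pairwise.map _ ?_ hf
  intro a b hab
  calc a * a = |a| * |a| := (abs_mul_abs_self a).symm
    _ ≤ |b| * |b| := by
        have ha := abs_nonneg a
        exact mul_le_mul hab hab ha (le_trans ha hab)
    _ = b * b := abs_mul_abs_self b

theorem alt_perm (arr : List Int) (S : Int) :
    List.Perm (ordered_squares_alt arr S)
      ((arr.map (fun x => x * x)).filter (fun sq => decide (0 ≤ sq ∧ sq ≤ S * (S + 1)))) := by
  unfold ordered_squares_alt
  have h1 : ((PySem.List.sorted arr (fun x => |x|) false).filter
      (fun x => decide (0 ≤ x * x ∧ x * x ≤ S * (S + 1)))).map (fun x => x * x)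
      = ((PySem.List.sorted arr (fun x => |x|) false).map (fun x => x * x)).filter
          (fun sq => decide (0 ≤ sq ∧ sq ≤ S * (S + 1))) := by
    rw [List.filter_map]
    rfl
  rw [h1]
  exact ((PySem.List.sorted_perm arr (fun x => |x|) false).map _).filter _

-- ===== VERDICT (by name: the statement is the Claim_ definition above) =====
theorem ordered_squares_spec : Claim_equal_ordered_squares := by
  intro arr S _
  unfold Spec_ordered_squares ordered_squares
  have hA : List.Perm
      (((arr.map (fun x => x * x)).filter
        (fun sq => decide (0 ≤ sq ∧ sq ≤ S * (S + 1)))).foldl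
          (fun acc square => insertA square acc) [])
      (ordered_squares_alt arr S) :=
    ((foldl_insertA_perm _ []).trans (by simp)).trans (alt_perm arr S).symm
  exact List.Perm.eq_of_pairwise (fun a b _ _ h1 h2 => le_antisymm h1 h2)
    (foldl_insertA_sorted _ [] List.Pairwise.nil) (alt_sorted arr S) hA
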